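-- pv_equiv track=rewrite | github.com/DrSaiedAbedi/codewars-demos | 4 kyo/decode_bits.py | disoverFrequcnyOf
-- ===== SOURCE A (Python) =====
-- def disoverFrequcnyOf(lMessage):
--     a = lMessage
--     a = a.replace('0', ' ')
--     d = a.split()
--     flag3Div = True
--     for x in d:
--         if len(x) % 3 != 0:
--             flag3Div = False
--         break
--     b = lMessage.replace('1', ' ')
--     c = b.split()
--     lWordMessage = []
--     for x in c:
--         lWordMessage.append(len(x))
--     freqM = 1
--     for y in lWordMessage:
--         if y % 7 == 0:
--             freqM= int(y / 7)
--         elif y % 3 == 0 and y > 3: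
--             freqM= int(y / 3)
--         else:
--             freqM = y;
--         if y == 3 and not flag3Div:
--             freqM= 1
--         if y == 3 and flag3Div:
--             freqM= 3
--     return(freqM)
-- ===== SOURCE B (Python) =====
-- def disoverFrequcnyOf(lMessage):
--     ones = lMessage.replace('0', ' ').split()
--     flag3Div = (not ones) or len(ones[0]) % 3 == 0
--     zeros = lMessage.replace('1', ' ').split()
--     if not zeros:
--         return 1
--     y = len(zeros[-1])
--     if y == 3:
--         return 3 if flag3Div else 1
--     if y % 7 == 0:
--         return y // 7
--     if y % 3 == 0 and y > 3:
--         return y // 3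
--     return y
-- ===== Notes on version B (the rewrite author's own statement) =====
-- stated objective: simpler
-- what changed: B drops A's intermediate list of 0-run lengths and the accumulator-overwriting loop: since A's loop ignores its accumulator, B reads the flag from the first 1-run and computes the answer directly from the last 0-run with early returns.
import Mathlib
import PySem

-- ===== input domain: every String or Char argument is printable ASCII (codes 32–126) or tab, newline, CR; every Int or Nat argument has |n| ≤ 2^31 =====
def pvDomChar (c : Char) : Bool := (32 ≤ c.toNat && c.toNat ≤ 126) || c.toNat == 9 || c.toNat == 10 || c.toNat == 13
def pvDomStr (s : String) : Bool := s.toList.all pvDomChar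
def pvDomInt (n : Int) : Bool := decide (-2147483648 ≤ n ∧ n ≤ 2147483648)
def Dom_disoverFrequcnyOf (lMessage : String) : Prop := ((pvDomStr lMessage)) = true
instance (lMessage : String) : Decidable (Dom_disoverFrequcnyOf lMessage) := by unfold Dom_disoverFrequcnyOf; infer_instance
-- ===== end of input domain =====

-- B replaces A's list-of-lengths and overwriting loop by direct closed-case logic on the
-- first 1-run and the last 0-run (objective: simpler; same observable return value).

-- ===== PORT A =====
def disoverFrequcnyOf (lMessage : String) : Int :=
  let a := PySem.Str.replace lMessage "0" " "
  let d := PySem.Str.split₀ a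
  -- for x in d: … break  — only the first element is ever inspected
  let flag3Div : Bool :=
    match d with
    | [] => true
    | x :: _ => if PySem.Str.len x % 3 ≠ 0 then false else true
  let b := PySem.Str.replace lMessage "1" " "
  let c := PySem.Str.split₀ b
  let lWordMessage := c.foldl (fun acc x => acc ++ [PySem.Str.len x]) []
  lWordMessage.foldl
    (fun _freqM y =>
      let f1 : Int :=
        if y % 7 == 0 then y / 7
        else if y % 3 == 0 && decide (y > 3) then y / 3
        else y
      let f2 : Int := if y == 3 && !flag3Div then 1 else f1
      if y == 3 && flag3Div then 3 else f2)
    1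

-- ===== PORT B =====
def disoverFrequcnyOf_alt (lMessage : String) : Int :=
  let ones := PySem.Str.split₀ (PySem.Str.replace lMessage "0" " ")
  let flag3Div : Bool := ones.isEmpty || PySem.Str.len (ones.headD "") % 3 == 0
  let zeros := PySem.Str.split₀ (PySem.Str.replace lMessage "1" " ")
  match zeros.getLast? with
  | none => 1
  | some last =>
    let y := PySem.Str.len last
    if y == 3 then (if flag3Div then 3 else 1)
    else if y % 7 == 0 then y / 7
    else if y % 3 == 0 && decide (y > 3) then y / 3
    else y

-- ===== PRECONDITION & SPEC =====
def Spec_disoverFrequcnyOf (lMessage : String) (out : Int) : Prop := out = disoverFrequcnyOf_alt lMessage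
instance (lMessage : String) (out : Int) : Decidable (Spec_disoverFrequcnyOf lMessage out) := by unfold Spec_disoverFrequcnyOf; infer_instance

-- ===== CLAIM (what is proved, stated in full; the proofs are below) =====
def Claim_equal_disoverFrequcnyOf : Prop := ∀ (lMessage : String), Dom_disoverFrequcnyOf lMessage → Spec_disoverFrequcnyOf lMessage (disoverFrequcnyOf lMessage)

-- ===== LEMMAS AND PROOFS =====

-- A fold whose step ignores its accumulator yields the step at the last element.
lemma foldl_ignore_acc {α : Type} (h : α → Int) (l : List α) (init : Int) :
    l.foldl (fun _ y => h y) init =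
      (match l.getLast? with | none => init | some y => h y) := by
  induction l generalizing init with
  | nil => rfl
  | cons a l ih =>
    cases l with
    | nil => simp [List.foldl]
    | cons b l => simpa [List.foldl, List.getLast?_cons_cons] using ih (h a)

lemma foldl_append_singleton {α β : Type} (f : α → β) (l : List α) (acc : List β) :
    l.foldl (fun acc x => acc ++ [f x]) acc = acc ++ l.map f := by
  induction l generalizing acc with
  | nil => simp
  | cons a l ih => simp [List.foldl, ih]

-- A's break-after-first flag equals B's head-based flag.
lemma flag_eq (d : List String) :
    (match d with
     | [] => true
     | x :: _ => if PySem.Str.len x % 3 ≠ 0 then false else true) =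
    (d.isEmpty || PySem.Str.len (d.headD "") % 3 == 0) := by
  cases d with
  | nil => rfl
  | cons x t =>
    by_cases h : (x.length : Int) % 3 = 0 <;>
      simp [h]

-- A's overwriting loop over the lengths equals B's last-run case analysis.
lemma core (flag : Bool) (c : List String) :
    List.foldl (fun (_ : Int) y =>
      if (y == 3 && flag) = true then 3
      else if (y == 3 && !flag) = true then 1
      else if (y % 7 == 0) = true then y / 7
      else if (y % 3 == 0 && decide (y > 3)) = true then y / 3
      else y) 1 (c.map PySem.Str.len) =
    (match c.getLast? with
     | none => 1
     | some last =>
       if (PySem.Str.len last == 3) = true then (if flag = true then 3 else 1)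
       else if (PySem.Str.len last % 7 == 0) = true then PySem.Str.len last / 7
       else if (PySem.Str.len last % 3 == 0 && decide (PySem.Str.len last > 3)) = true
         then PySem.Str.len last / 3
       else PySem.Str.len last) := by
  rw [List.foldl_map, foldl_ignore_acc]
  cases hL : c.getLast? with
  | none => rfl
  | some last =>
    simp only
    by_cases h3 : (last.length : Int) = 3
    · cases flag <;> simp [h3]
    · simp [h3]

-- ===== VERDICT (by name: the statement is the Claim_ definition above) =====
theorem disoverFrequcnyOf_spec : Claim_equal_disoverFrequcnyOf := by
  intro s _
  show disoverFrequcnyOf s = disoverFrequcnyOf_alt s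
  unfold disoverFrequcnyOf disoverFrequcnyOf_alt
  simp only [foldl_append_singleton, List.nil_append, flag_eq]
  exact core _ _
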